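-- pv_equiv track=rewrite | github.com/dojorio/dojolive | 2020/20200923 - intervalos - python/test_intervalos.py | intervalo
-- ===== SOURCE A (Python) =====
-- def intervalo(lista_numeros):
--     resultado = []
--     numero_anterior = None
--
--     for numero in lista_numeros:
--         if resultado and numero == numero_anterior + 1:
--             if len(resultado[-1]) == 1:
--                 resultado[-1].append(numero)
--             else:
--                 resultado[-1][-1] = numero
--         else:
--             resultado.append([numero])
--         numero_anterior = numero  # 301
--     return resultado  # [[100], [200, 202], [300, 301]]
-- ===== SOURCE B (Python) =====
-- def intervalo(lista_numeros):
--     xs = list(lista_numeros)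
--     n = len(xs)
--     out = []
--     i = 0
--     while i < n:
--         j = i + 1
--         while j < n and xs[j] == xs[j - 1] + 1:
--             j += 1
--         out.append([xs[i]] if j == i + 1 else [xs[i], xs[j - 1]])
--         i = j
--     return out
-- ===== Notes on version B (the rewrite author's own statement) =====
-- stated objective: alternative
-- what changed: B replaces A's per-element state machine (which mutates the last emitted group and tracks the previous number) with an index-based two-pointer scan that first locates each maximal run's end index and then emits the finished interval in one step, never inspecting or mutating already-emitted output.
import Mathlib
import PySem

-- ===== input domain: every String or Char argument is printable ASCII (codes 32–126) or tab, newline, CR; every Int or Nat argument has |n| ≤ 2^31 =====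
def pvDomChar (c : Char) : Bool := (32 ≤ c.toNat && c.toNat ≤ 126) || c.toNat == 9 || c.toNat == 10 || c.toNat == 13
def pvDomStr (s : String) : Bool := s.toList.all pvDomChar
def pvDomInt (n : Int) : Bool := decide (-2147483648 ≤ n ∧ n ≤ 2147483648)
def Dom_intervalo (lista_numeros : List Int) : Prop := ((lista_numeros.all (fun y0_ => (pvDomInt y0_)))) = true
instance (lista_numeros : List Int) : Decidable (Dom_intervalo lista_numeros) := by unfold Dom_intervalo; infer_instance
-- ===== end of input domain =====

-- B replaces A's per-element state machine mutating the last emitted group by a two-pointer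
-- index scan that finds each maximal run's end and emits the finished interval in one step.

-- ===== PORT A =====
-- resultado[-1] is modified in place: pySetLast applies a function to the last element.
def pySetLast {α : Type} (xs : List α) (f : α → α) : List α :=
  match xs with
  | [] => []
  | [x] => [f x]
  | x :: rest => x :: pySetLast rest f

-- prev is always `some` whenever resultado ≠ [] during execution, so `.getD 0` is never the value compared.
def stepA (st : List (List Int) × Option Int) (n : Int) : List (List Int) × Option Int :=
  if st.1 ≠ [] ∧ n = st.2.getD 0 + 1 then
    if (st.1.getLast?.getD []).length = 1 then
      (pySetLast st.1 (fun l => l ++ [n]), some n)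
    else
      (pySetLast st.1 (fun l => pySetLast l (fun _ => n)), some n)
  else (st.1 ++ [[n]], some n)

def intervalo (lista_numeros : List Int) : List (List Int) :=
  (lista_numeros.foldl stepA ([], none)).1

-- ===== PORT B =====
-- inner `while j < n and xs[j] == xs[j-1] + 1: j += 1`; the indices j, j-1 are provably
-- in [0, n) whenever read, so List.getD is exactly Python's xs[j] there.
def findRunEnd (xs : List Int) (n : Nat) (j : Nat) : Nat :=
  if _h : j < n then
    if xs.getD j 0 = xs.getD (j - 1) 0 + 1 then findRunEnd xs n (j + 1) else j
  else j
termination_by n - j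

theorem le_findRunEnd (xs : List Int) (n : Nat) : ∀ j, j ≤ findRunEnd xs n j := by
  intro j
  fun_induction findRunEnd xs n j with
  | case1 j h hc ih => omega
  | case2 j h hc => exact le_refl j
  | case3 j h => exact le_refl j

-- outer `while i < n` loop, accumulating `out`.
def scan (xs : List Int) (n : Nat) (i : Nat) (out : List (List Int)) : List (List Int) :=
  if _h : i < n then
    let j := findRunEnd xs n (i + 1)
    scan xs n j
      (out ++ [if j = i + 1 then [xs.getD i 0] else [xs.getD i 0, xs.getD (j - 1) 0]])
  else out
termination_by n - i
decreasing_by have := le_findRunEnd xs n (i + 1); omega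

def intervalo_alt (lista_numeros : List Int) : List (List Int) :=
  scan lista_numeros lista_numeros.length 0 []

-- ===== PRECONDITION & SPEC =====
def Spec_intervalo (lista_numeros : List Int) (out : List (List Int)) : Prop := out = intervalo_alt lista_numeros
instance (lista_numeros : List Int) (out : List (List Int)) : Decidable (Spec_intervalo lista_numeros out) := by unfold Spec_intervalo; infer_instance

-- ===== CLAIM (what is proved, stated in full; the proofs are below) =====
def Claim_equal_intervalo : Prop := ∀ (lista_numeros : List Int), Dom_intervalo lista_numeros → Spec_intervalo lista_numeros (intervalo lista_numeros)

-- ===== LEMMAS AND PROOFS =====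

-- proof-only characterization: split off the maximal consecutive run, recurse.
def runSplit (s : Int) : List Int → Int × List Int
  | [] => (s, [])
  | x :: t => if x = s + 1 then runSplit x t else (s, x :: t)

theorem runSplit_len (s : Int) (t : List Int) : (runSplit s t).2.length ≤ t.length := by
  induction t generalizing s with
  | nil => simp [runSplit]
  | cons x u ih =>
    simp only [runSplit]
    split
    · exact le_trans (ih x) (Nat.le_succ _)
    · simp

theorem runSplit_ge (s : Int) (t : List Int) : s ≤ (runSplit s t).1 := by
  induction t generalizing s with
  | nil => simp [runSplit]
  | cons x u ih =>
    simp only [runSplit]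
    split
    · exact le_trans (by omega) (ih x)
    · simp

theorem runSplit_cases (s : Int) (t : List Int) :
    runSplit s t = (s, t) ∨ (s < (runSplit s t).1 ∧ (runSplit s t).2.length < t.length) := by
  cases t with
  | nil => left; rfl
  | cons x u =>
    simp only [runSplit]
    split
    · right
      constructor
      · have := runSplit_ge x u; omega
      · exact Nat.lt_succ_of_le (runSplit_len x u)
    · left; rfl

def G : List Int → List (List Int)
  | [] => []
  | x :: t =>
    (if (runSplit x t).1 = x then [x] else [x, (runSplit x t).1]) :: G (runSplit x t).2
termination_by l => l.length
decreasing_by exact Nat.lt_succ_of_le (runSplit_len x t)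

theorem G_nil : G [] = [] := by rw [G]

theorem G_cons (x : Int) (t : List Int) :
    G (x :: t) = (if (runSplit x t).1 = x then [x] else [x, (runSplit x t).1]) :: G (runSplit x t).2 := by
  rw [G]

theorem pySetLast_cons_of_ne_nil {α : Type} (a : α) (l : List α) (f : α → α) (h : l ≠ []) :
    pySetLast (a :: l) f = a :: pySetLast l f := by
  cases l with
  | nil => exact absurd rfl h
  | cons b t => rfl

theorem pySetLast_concat {α : Type} (acc : List α) (x : α) (f : α → α) :
    pySetLast (acc ++ [x]) f = acc ++ [f x] := by
  induction acc with
  | nil => rfl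
  | cons a acc ih =>
    rw [List.cons_append, pySetLast_cons_of_ne_nil a _ f (by simp), ih]
    simp

theorem stepA_ext1 (acc : List (List Int)) (n x : Int) (hx : x = n + 1) :
    stepA (acc ++ [[n]], some n) x = (acc ++ [[n, x]], some x) := by
  simp only [stepA, Option.getD_some]
  rw [if_pos ⟨by simp, hx⟩]
  rw [show (acc ++ [[n]]).getLast? = some [n] by simp]
  simp only [Option.getD_some, List.length_cons, List.length_nil]
  rw [if_pos trivial, pySetLast_concat]
  rfl

theorem stepA_ext2 (acc : List (List Int)) (s e x : Int) (hx : x = e + 1) :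
    stepA (acc ++ [[s, e]], some e) x = (acc ++ [[s, x]], some x) := by
  simp only [stepA, Option.getD_some]
  rw [if_pos ⟨by simp, hx⟩]
  rw [show (acc ++ [[s, e]]).getLast? = some [s, e] by simp]
  simp only [Option.getD_some, List.length_cons, List.length_nil]
  rw [if_neg (by omega)]
  rw [pySetLast_concat]
  rfl

theorem stepA_new (l : List (List Int)) (p : Option Int) (x : Int)
    (hx : ¬ (l ≠ [] ∧ x = p.getD 0 + 1)) :
    stepA (l, p) x = (l ++ [[x]], some x) := by
  simp only [stepA]
  rw [if_neg hx]

theorem foldA_run (t : List Int) :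
    (∀ (acc : List (List Int)) (n : Int),
        (t.foldl stepA (acc ++ [[n]], some n)).1
          = acc ++ (if (runSplit n t).1 = n then [n] else [n, (runSplit n t).1]) :: G (runSplit n t).2)
    ∧ (∀ (acc : List (List Int)) (s e : Int),
        (t.foldl stepA (acc ++ [[s, e]], some e)).1
          = acc ++ [s, (runSplit e t).1] :: G (runSplit e t).2) := by
  induction t with
  | nil =>
    constructor
    · intro acc n; simp [runSplit, G_nil]
    · intro acc s e; simp [runSplit, G_nil]
  | cons x u ih =>
    constructor
    · intro acc n
      by_cases hx : x = n + 1
      · rw [List.foldl_cons, stepA_ext1 acc n x hx, ih.2 acc n x]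
        have hrs : runSplit n (x :: u) = runSplit x u := by simp [runSplit, hx]
        have hge : x ≤ (runSplit x u).1 := runSplit_ge x u
        rw [hrs, if_neg (by omega)]
      · rw [List.foldl_cons, stepA_new _ _ _ (by simp [hx]),
            show acc ++ [[n]] ++ [[x]] = (acc ++ [[n]]) ++ [[x]] by simp]
        rw [(ih.1) (acc ++ [[n]]) x]
        have hrs : runSplit n (x :: u) = (n, x :: u) := by simp [runSplit, hx]
        rw [hrs]
        simp [G_cons]
    · intro acc s e
      by_cases hx : x = e + 1
      · rw [List.foldl_cons, stepA_ext2 acc s e x hx, ih.2 acc s x]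
        have hrs : runSplit e (x :: u) = runSplit x u := by simp [runSplit, hx]
        rw [hrs]
      · rw [List.foldl_cons, stepA_new _ _ _ (by simp [hx]),
            show acc ++ [[s, e]] ++ [[x]] = (acc ++ [[s, e]]) ++ [[x]] by simp]
        rw [(ih.1) (acc ++ [[s, e]]) x]
        have hrs : runSplit e (x :: u) = (e, x :: u) := by simp [runSplit, hx]
        rw [hrs]
        simp [G_cons]

theorem intervalo_eq_G (xs : List Int) : intervalo xs = G xs := by
  cases xs with
  | nil => simp [intervalo, G_nil]
  | cons x t =>
    unfold intervalo
    rw [List.foldl_cons, stepA_new [] none x (by simp)]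
    have h := (foldA_run t).1 [] x
    simp only [List.nil_append] at h ⊢
    rw [h, G_cons]

theorem findRunEnd_spec (xs : List Int) :
    ∀ (k j : Nat), xs.length - j ≤ k → 1 ≤ j → j ≤ xs.length →
      findRunEnd xs xs.length j
          = xs.length - (runSplit (xs.getD (j - 1) 0) (xs.drop j)).2.length
        ∧ xs.getD (findRunEnd xs xs.length j - 1) 0 = (runSplit (xs.getD (j - 1) 0) (xs.drop j)).1
        ∧ xs.drop (findRunEnd xs xs.length j) = (runSplit (xs.getD (j - 1) 0) (xs.drop j)).2 := by
  intro k
  induction k with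
  | zero =>
    intro j hk h1 hj
    have hj' : j = xs.length := by omega
    subst hj'
    rw [findRunEnd, dif_neg (by omega)]
    simp [runSplit, List.drop_of_length_le (le_refl xs.length)]
  | succ k ih =>
    intro j hk h1 hj
    rcases Nat.lt_or_ge j xs.length with hlt | hge
    · have hdrop : xs.drop j = xs[j] :: xs.drop (j + 1) := List.drop_eq_getElem_cons hlt
      have hgj : xs.getD j 0 = xs[j] := List.getD_eq_getElem xs 0 hlt
      rw [findRunEnd, dif_pos hlt]
      by_cases hc : xs.getD j 0 = xs.getD (j - 1) 0 + 1
      · rw [if_pos hc]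
        have h' := ih (j + 1) (by omega) (by omega) (by omega)
        rw [show (j + 1) - 1 = j from rfl] at h'
        have hrs : runSplit (xs.getD (j - 1) 0) (xs.drop j)
            = runSplit (xs.getD j 0) (xs.drop (j + 1)) := by
          rw [hdrop, runSplit, if_pos (by rw [← hgj]; exact hc), hgj]
        rw [hrs]
        exact h'
      · rw [if_neg hc]
        have hrs : runSplit (xs.getD (j - 1) 0) (xs.drop j)
            = (xs.getD (j - 1) 0, xs.drop j) := by
          rw [hdrop, runSplit, if_neg (by rw [← hgj]; exact hc), ← hdrop]
        rw [hrs]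
        refine ⟨by simp [List.length_drop]; omega, rfl, rfl⟩
    · have hj' : j = xs.length := by omega
      subst hj'
      rw [findRunEnd, dif_neg (by omega)]
      simp [runSplit, List.drop_of_length_le (le_refl xs.length)]

theorem scan_eq_G (xs : List Int) :
    ∀ (k i : Nat) (out : List (List Int)), xs.length - i ≤ k →
      scan xs xs.length i out = out ++ G (xs.drop i) := by
  intro k
  induction k with
  | zero =>
    intro i out hk
    rw [scan, dif_neg (by omega)]
    rw [List.drop_of_length_le (by omega), G_nil, List.append_nil]
  | succ k ih =>
    intro i out hk
    rcases Nat.lt_or_ge i xs.length with hlt | hge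
    · have hdrop : xs.drop i = xs[i] :: xs.drop (i + 1) := List.drop_eq_getElem_cons hlt
      have hgi : xs.getD i 0 = xs[i] := List.getD_eq_getElem xs 0 hlt
      obtain ⟨hf1, hf2, hf3⟩ := findRunEnd_spec xs (xs.length - (i + 1)) (i + 1)
        (le_refl _) (by omega) (by omega)
      rw [show (i + 1) - 1 = i from rfl] at hf1 hf2 hf3
      have hjge : i + 1 ≤ findRunEnd xs xs.length (i + 1) := le_findRunEnd xs xs.length (i + 1)
      have hlen : (xs.drop (i + 1)).length = xs.length - (i + 1) := List.length_drop
      rw [scan, dif_pos hlt]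
      show scan xs xs.length (findRunEnd xs xs.length (i + 1))
          (out ++ [if findRunEnd xs xs.length (i + 1) = i + 1 then [xs.getD i 0]
                   else [xs.getD i 0, xs.getD (findRunEnd xs xs.length (i + 1) - 1) 0]])
        = out ++ G (xs.drop i)
      rcases runSplit_cases (xs.getD i 0) (xs.drop (i + 1)) with hcase | ⟨hlt1, hlt2⟩
      · -- run does not extend: j = i + 1
        have hjeq : findRunEnd xs xs.length (i + 1) = i + 1 := by
          rw [hf1, hcase, hlen]; omega
        rw [if_pos hjeq, hjeq, ih (i + 1) _ (by omega), hdrop, G_cons, ← hgi, hcase]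
        simp
      · -- run extends: j > i + 1
        rw [hlen] at hlt2
        have hjne : findRunEnd xs xs.length (i + 1) ≠ i + 1 := by rw [hf1]; omega
        rw [if_neg hjne, ih _ _ (by rw [hf1]; omega), hf3, hdrop, G_cons, ← hgi,
            if_neg (by omega), hf2]
        simp
    · rw [scan, dif_neg (by omega)]
      rw [List.drop_of_length_le (by omega), G_nil, List.append_nil]

theorem intervalo_alt_eq_G (xs : List Int) : intervalo_alt xs = G xs := by
  unfold intervalo_alt
  rw [scan_eq_G xs xs.length 0 [] (by omega)]
  simp

-- ===== VERDICT =====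
theorem intervalo_spec : Claim_equal_intervalo := by
  intro xs _
  unfold Spec_intervalo
  rw [intervalo_eq_G, intervalo_alt_eq_G]
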